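-- pv_equiv track=rewrite | github.com/PasinduNimeshS/Sinhala-OCR-App-Backend | predict_sentence.py | get_word_boxes_from_letters
-- ===== SOURCE A (Python) =====
-- WORD_DILATE_W = 35
--
-- def get_word_boxes_from_letters(letter_boxes_per_row):
--     word_boxes = []
--     for row in letter_boxes_per_row:
--         if not row:
--             continue
--         row = sorted(row, key=lambda b: b[0])
--         current_word = [row[0]]
--         gap_threshold = WORD_DILATE_W
--
--         for box in row[1:]:
--             last_x = current_word[-1][0] + current_word[-1][2]
--             curr_x = box[0]
--             if curr_x - last_x <= gap_threshold:
--                 current_word.append(box)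
--             else:
--                 if len(current_word) >= 1:
--                     xs = [b[0] for b in current_word]
--                     ys = [b[1] for b in current_word]
--                     ws = [b[2] for b in current_word]
--                     hs = [b[3] for b in current_word]
--                     x_min = min(xs)
--                     y_min = min(ys)
--                     x_max = max(x + w for x, w in zip(xs, ws))
--                     y_max = max(y + h for y, h in zip(ys, hs))
--                     word_boxes.append((x_min, y_min, x_max - x_min, y_max - y_min))
--                 current_word = [box]
--
--         if len(current_word) >= 1:
--             xs = [b[0] for b in current_word]
--             ys = [b[1] for b in current_word]
--             ws = [b[2] for b in current_word]
--             hs = [b[3] for b in current_word]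
--             x_min = min(xs)
--             y_min = min(ys)
--             x_max = max(x + w for x, w in zip(xs, ws))
--             y_max = max(y + h for y, h in zip(ys, hs))
--             word_boxes.append((x_min, y_min, x_max - x_min, y_max - y_min))
--
--     return word_boxes
-- ===== SOURCE B (Python) =====
-- WORD_DILATE_W = 35
--
--
-- def get_word_boxes_from_letters(letter_boxes_per_row):
--     # Single pass per row with O(1) running aggregates: no word group lists are
--     # ever built; the current word is represented only by (x0, y0, x1, y1, right).
--     out = []
--     for row in letter_boxes_per_row:
--         if not row:
--             continue
--         srow = sorted(row, key=lambda b: b[0])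
--         c = srow[0]
--         st = (c[0], c[1], c[0] + c[2], c[1] + c[3], c[0] + c[2])
--         for b in srow[1:]:
--             x0, y0, x1, y1, right = st
--             if b[0] - right > WORD_DILATE_W:
--                 out.append((x0, y0, x1 - x0, y1 - y0))
--                 st = (b[0], b[1], b[0] + b[2], b[1] + b[3], b[0] + b[2])
--             else:
--                 st = (min(x0, b[0]), min(y0, b[1]),
--                       max(x1, b[0] + b[2]), max(y1, b[1] + b[3]),
--                       b[0] + b[2])
--         x0, y0, x1, y1, right = st
--         out.append((x0, y0, x1 - x0, y1 - y0))
--     return out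
-- ===== Notes on version B (the rewrite author's own statement) =====
-- stated objective: alternative
-- what changed: Replaces A's materialized current-word box list (min/max recomputed over xs/ys/ws/hs lists at every flush) by a streaming scan that keeps only five running integers (x0, y0, x1, y1, right) per word, updating the bounding box incrementally and emitting it on each gap.
import Mathlib
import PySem

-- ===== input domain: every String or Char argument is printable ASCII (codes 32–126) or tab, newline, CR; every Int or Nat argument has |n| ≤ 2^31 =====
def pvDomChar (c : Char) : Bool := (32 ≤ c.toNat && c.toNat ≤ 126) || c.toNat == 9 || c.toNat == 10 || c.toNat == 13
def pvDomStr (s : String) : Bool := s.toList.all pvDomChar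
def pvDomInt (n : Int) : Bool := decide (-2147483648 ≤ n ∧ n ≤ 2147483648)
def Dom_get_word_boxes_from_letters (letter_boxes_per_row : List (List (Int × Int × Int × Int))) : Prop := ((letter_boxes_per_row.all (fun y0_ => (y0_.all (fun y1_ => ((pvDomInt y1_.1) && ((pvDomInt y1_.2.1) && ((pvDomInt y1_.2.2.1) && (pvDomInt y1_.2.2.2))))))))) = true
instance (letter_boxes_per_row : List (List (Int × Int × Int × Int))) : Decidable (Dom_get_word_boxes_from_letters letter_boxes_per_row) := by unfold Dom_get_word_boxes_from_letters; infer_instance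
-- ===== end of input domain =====

-- B replaces A's materialized current-word list (min/max over xs/ys/ws/hs at each flush) by a
-- streaming scan keeping only five running integers per word; same return value ('alternative').

-- ===== PORT A =====
-- flush body of A: xs/ys/ws/hs lists, min/max over them (min/max of a nonempty list; .getD 0 is never reached)
def pvBBoxA (cw : List (Int × Int × Int × Int)) : Int × Int × Int × Int :=
  let xs := cw.map (fun b => b.1)
  let ys := cw.map (fun b => b.2.1)
  let ws := cw.map (fun b => b.2.2.1)
  let hs := cw.map (fun b => b.2.2.2)
  let x_min := (PySem.List.min? xs (fun x => x)).getD 0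
  let y_min := (PySem.List.min? ys (fun x => x)).getD 0
  let x_max := (PySem.List.max? ((xs.zip ws).map (fun p => p.1 + p.2)) (fun x => x)).getD 0
  let y_max := (PySem.List.max? ((ys.zip hs).map (fun p => p.1 + p.2)) (fun x => x)).getD 0
  (x_min, y_min, x_max - x_min, y_max - y_min)

-- body of A's inner loop; state = (current_word, word_boxes); current_word[-1] is always defined
def pvStepA (st : List (Int × Int × Int × Int) × List (Int × Int × Int × Int))
    (box : Int × Int × Int × Int) :
    List (Int × Int × Int × Int) × List (Int × Int × Int × Int) :=
  let last := PySem.List.pyGetD st.1 (-1) (0, 0, 0, 0)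
  let last_x := last.1 + last.2.2.1
  if box.1 - last_x ≤ 35 then (st.1 ++ [box], st.2)
  else ([box], if 1 ≤ st.1.length then st.2 ++ [pvBBoxA st.1] else st.2)

-- body of A's outer loop over rows
def pvRowA (word_boxes : List (Int × Int × Int × Int)) (row : List (Int × Int × Int × Int)) :
    List (Int × Int × Int × Int) :=
  if row = [] then word_boxes
  else
    match PySem.List.sorted row (fun b => b.1) false with
    | [] => word_boxes  -- unreachable: sorted of a nonempty list is nonempty
    | r0 :: rest =>
      let st := rest.foldl pvStepA ([r0], word_boxes)
      if 1 ≤ st.1.length then st.2 ++ [pvBBoxA st.1] else st.2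

def get_word_boxes_from_letters (letter_boxes_per_row : List (List (Int × Int × Int × Int))) :
    List (Int × Int × Int × Int) :=
  letter_boxes_per_row.foldl pvRowA []

-- ===== PORT B =====
-- st = (x0, y0, x1, y1, right): the running aggregates initialised from the first box of a word
def pvInitB (c : Int × Int × Int × Int) : Int × Int × Int × Int × Int :=
  (c.1, c.2.1, c.1 + c.2.2.1, c.2.1 + c.2.2.2, c.1 + c.2.2.1)

-- the else-branch update: fold the next box into the running aggregates
def pvMergeB (s : Int × Int × Int × Int × Int) (b : Int × Int × Int × Int) :
    Int × Int × Int × Int × Int :=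
  (min s.1 b.1, min s.2.1 b.2.1, max s.2.2.1 (b.1 + b.2.2.1),
   max s.2.2.2.1 (b.2.1 + b.2.2.2), b.1 + b.2.2.1)

-- body of B's inner loop; state = (running aggregates, out)
def pvStepB (st : (Int × Int × Int × Int × Int) × List (Int × Int × Int × Int))
    (b : Int × Int × Int × Int) :
    (Int × Int × Int × Int × Int) × List (Int × Int × Int × Int) :=
  if 35 < b.1 - st.1.2.2.2.2 then
    (pvInitB b, st.2 ++ [(st.1.1, st.1.2.1, st.1.2.2.1 - st.1.1, st.1.2.2.2.1 - st.1.2.1)])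
  else (pvMergeB st.1 b, st.2)

def pvRowB (out : List (Int × Int × Int × Int)) (row : List (Int × Int × Int × Int)) :
    List (Int × Int × Int × Int) :=
  if row = [] then out
  else
    match PySem.List.sorted row (fun b => b.1) false with
    | [] => out  -- unreachable: sorted of a nonempty list is nonempty
    | r0 :: rest =>
      let st := rest.foldl pvStepB (pvInitB r0, out)
      st.2 ++ [(st.1.1, st.1.2.1, st.1.2.2.1 - st.1.1, st.1.2.2.2.1 - st.1.2.1)]

def get_word_boxes_from_letters_alt (letter_boxes_per_row : List (List (Int × Int × Int × Int))) :
    List (Int × Int × Int × Int) :=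
  letter_boxes_per_row.foldl pvRowB []

-- ===== PRECONDITION & SPEC =====
def Spec_get_word_boxes_from_letters (letter_boxes_per_row : List (List (Int × Int × Int × Int))) (out : List (Int × Int × Int × Int)) : Prop := out = get_word_boxes_from_letters_alt letter_boxes_per_row
instance (letter_boxes_per_row : List (List (Int × Int × Int × Int))) (out : List (Int × Int × Int × Int)) : Decidable (Spec_get_word_boxes_from_letters letter_boxes_per_row out) := by unfold Spec_get_word_boxes_from_letters; infer_instance

-- ===== CLAIM =====
def Claim_equal_get_word_boxes_from_letters : Prop := ∀ (letter_boxes_per_row : List (List (Int × Int × Int × Int))), Dom_get_word_boxes_from_letters letter_boxes_per_row → Spec_get_word_boxes_from_letters letter_boxes_per_row (get_word_boxes_from_letters letter_boxes_per_row)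

-- ===== LEMMAS AND PROOFS =====

-- proof-side abstraction: the aggregates B maintains, computed from A's current_word list
def pvAggOf (cw : List (Int × Int × Int × Int)) : Int × Int × Int × Int × Int :=
  match cw with
  | [] => (0, 0, 0, 0, 0)
  | c :: t => t.foldl pvMergeB (pvInitB c)

theorem pvAgg_append (cw : List (Int × Int × Int × Int)) (b : Int × Int × Int × Int)
    (h : cw ≠ []) : pvAggOf (cw ++ [b]) = pvMergeB (pvAggOf cw) b := by
  cases cw with
  | nil => exact absurd rfl h
  | cons c t => simp [pvAggOf, List.foldl_append]

-- the 'right' component of the aggregates is the last box's right edge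
theorem pvAgg_right (cw : List (Int × Int × Int × Int)) (h : cw ≠ []) :
    (pvAggOf cw).2.2.2.2 = (cw.getLast h).1 + (cw.getLast h).2.2.1 := by
  induction cw using List.reverseRecOn with
  | nil => exact absurd rfl h
  | append_singleton l b ih =>
    cases l with
    | nil => simp [pvAggOf, pvInitB]
    | cons c t =>
      rw [pvAgg_append _ _ (by simp)]
      simp [pvMergeB]

-- projections of the aggregate fold as plain min/max folds
theorem pvAgg_proj (t : List (Int × Int × Int × Int)) (s : Int × Int × Int × Int × Int) :
    (t.foldl pvMergeB s).1 = t.foldl (fun a b => min a b.1) s.1 ∧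
    (t.foldl pvMergeB s).2.1 = t.foldl (fun a b => min a b.2.1) s.2.1 ∧
    (t.foldl pvMergeB s).2.2.1 = t.foldl (fun a b => max a (b.1 + b.2.2.1)) s.2.2.1 ∧
    (t.foldl pvMergeB s).2.2.2.1 = t.foldl (fun a b => max a (b.2.1 + b.2.2.2)) s.2.2.2.1 := by
  induction t generalizing s with
  | nil => exact ⟨rfl, rfl, rfl, rfl⟩
  | cons b t ih => simpa [pvMergeB] using ih (pvMergeB s b)

-- A's flush value from the aggregates
theorem pvBBoxA_agg (cw : List (Int × Int × Int × Int)) (h : cw ≠ []) :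
    pvBBoxA cw = ((pvAggOf cw).1, (pvAggOf cw).2.1,
      (pvAggOf cw).2.2.1 - (pvAggOf cw).1, (pvAggOf cw).2.2.2.1 - (pvAggOf cw).2.1) := by
  cases cw with
  | nil => exact absurd rfl h
  | cons c t =>
    obtain ⟨h1, h2, h3, h4⟩ := pvAgg_proj t (pvInitB c)
    simp only [pvInitB] at h1 h2 h3 h4
    simp only [pvBBoxA, pvAggOf, pvInitB, List.map_cons, List.zip_cons_cons, List.zip_map',
      List.map_map, Function.comp_def, PySem.List.min?_id_cons, PySem.List.max?_id_cons,
      Option.getD_some, List.foldl_map, h1, h2, h3, h4]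

-- A's interleaved fold keeps a nonempty current_word
theorem pvFoldA_ne (l : List (Int × Int × Int × Int))
    (cw wb : List (Int × Int × Int × Int)) (h : cw ≠ []) :
    (l.foldl pvStepA (cw, wb)).1 ≠ [] := by
  induction l generalizing cw wb with
  | nil => simpa using h
  | cons b t ih =>
    simp only [List.foldl_cons, pvStepA]
    split
    · exact ih _ _ (by simp)
    · exact ih _ _ (by simp)

-- the streaming fold simulates A's fold through pvAggOf
theorem pvFoldAB (l : List (Int × Int × Int × Int))
    (cw wb : List (Int × Int × Int × Int)) (h : cw ≠ []) :
    l.foldl pvStepB (pvAggOf cw, wb) =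
      (pvAggOf (l.foldl pvStepA (cw, wb)).1, (l.foldl pvStepA (cw, wb)).2) := by
  induction l generalizing cw wb with
  | nil => rfl
  | cons b t ih =>
    simp only [List.foldl_cons, pvStepA, pvStepB, PySem.List.pyGetD_neg_one _ _ h,
      pvAgg_right cw h]
    set L : Int := (cw.getLast h).1 + (cw.getLast h).2.2.1 with hL
    by_cases hc : b.1 - L ≤ 35
    · rw [if_pos hc, if_neg (show ¬ 35 < b.1 - L by omega), ← pvAgg_append cw b h]
      exact ih (cw ++ [b]) wb (by simp)
    · rw [if_neg hc, if_pos (show 35 < b.1 - L by omega),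
        if_pos (show 1 ≤ cw.length by cases cw with | nil => exact absurd rfl h | cons a l => simp),
        pvBBoxA_agg cw h]
      exact ih [b] _ (by simp)

-- the two row bodies agree
theorem pvRow_eq (wb row : List (Int × Int × Int × Int)) : pvRowA wb row = pvRowB wb row := by
  unfold pvRowA pvRowB
  split
  · rfl
  · split
    · rfl
    · rename_i r0 rest _
      have hB : rest.foldl pvStepB (pvInitB r0, wb) =
          (pvAggOf (rest.foldl pvStepA ([r0], wb)).1, (rest.foldl pvStepA ([r0], wb)).2) :=
        pvFoldAB rest [r0] wb (by simp)
      have hne := pvFoldA_ne rest [r0] wb (by simp)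
      rw [if_pos (by cases hfe : (rest.foldl pvStepA ([r0], wb)).1 <;> simp_all)]
      simp only [show pvInitB r0 = pvAggOf [r0] from rfl] at hB ⊢
      rw [hB, pvBBoxA_agg _ hne]

-- ===== VERDICT =====
theorem get_word_boxes_from_letters_spec : Claim_equal_get_word_boxes_from_letters := by
  intro rows _
  unfold Spec_get_word_boxes_from_letters get_word_boxes_from_letters get_word_boxes_from_letters_alt
  have : pvRowA = pvRowB := funext fun wb => funext fun row => pvRow_eq wb row
  rw [this]
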